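-- pv_equiv track=rewrite | github.com/ireneGelfeld/AQM | NewRunout_file_v2_modified.py | SortCircle_Coord
-- ===== SOURCE A (Python) =====
-- def SortCircle_Coord(circle_centers):
--
--
--     circles_sorted1 = sorted(circle_centers, key=lambda x: x[0])
--
--     x_values = [center[0] for center in circles_sorted1]
--
--     y_values = [center[1] for center in circles_sorted1]
--
--     current_line = {}
--
--     k=0
--     l=[]
--
--     for i in range(len(x_values) - 1):
--
--         diff = x_values[i + 1] - x_values[i]
--         l.append((x_values[i],y_values[i]))
--
--         if abs(diff) > 5:  # Adjust the threshold as needed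
--             if len(l)<10:
--                 l=[]
--                 continue;
--             current_line[k]=l
--             l=[]
--             k=k+1;
--
--     l.append((x_values[len(x_values)-1],y_values[len(x_values)-1]))
--
--     current_line[k]=l
--
--     current_line_sorted={}
--     for k,l in current_line.items():
--         l_sorted = sorted(l, key=lambda x: x[1])
--         current_line_sorted[k]=l_sorted
--
--     return current_line_sorted
-- ===== SOURCE B (Python) =====
-- def SortCircle_Coord(circle_centers):
--     pts = sorted(circle_centers, key=lambda p: p[0])
--     n = len(pts)
--     breaks = [j + 1 for j in range(n - 1) if abs(pts[j + 1][0] - pts[j][0]) > 5]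
--     bounds = [0] + breaks + [n]
--     segs = [pts[a:b] for a, b in zip(bounds, bounds[1:])]
--     kept = [s for s in segs[:-1] if len(s) >= 10] + [segs[-1]]
--     return {i: sorted(s, key=lambda q: q[1]) for i, s in enumerate(kept)}
-- ===== Notes on version B (the rewrite author's own statement) =====
-- stated objective: alternative
-- what changed: A streams once over the x-sorted points with a mutable accumulator, run counter and dict, discarding short runs inline; B computes the list of break indices, slices the sorted list into segments, filters the non-final short segments, and builds the result dict by enumerating the kept segments.
import Mathlib
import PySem

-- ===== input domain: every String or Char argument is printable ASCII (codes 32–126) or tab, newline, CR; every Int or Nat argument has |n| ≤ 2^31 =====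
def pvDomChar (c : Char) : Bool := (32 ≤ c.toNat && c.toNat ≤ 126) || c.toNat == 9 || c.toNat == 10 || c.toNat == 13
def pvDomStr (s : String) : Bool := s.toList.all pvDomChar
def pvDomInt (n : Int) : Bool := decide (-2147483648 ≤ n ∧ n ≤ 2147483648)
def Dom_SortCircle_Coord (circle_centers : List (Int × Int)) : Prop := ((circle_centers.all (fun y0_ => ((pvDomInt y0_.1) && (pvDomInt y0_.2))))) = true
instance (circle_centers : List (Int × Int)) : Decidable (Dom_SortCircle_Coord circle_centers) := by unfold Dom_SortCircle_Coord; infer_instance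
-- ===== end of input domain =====

-- B replaces A's streaming accumulator/dict loop by a sort → break-indices → slices → filter
-- pipeline (objective: alternative decomposition, same asymptotic cost).
-- Pre_ excludes only the empty list, where A raises IndexError (x_values[-1] on []).

-- ===== PORT A =====
-- literal transliteration of A; the final x_values[len-1] lookup is pyGetD with a dummy
-- default, exact on Pre_ (nonempty input); Python raises IndexError there on [].
def SortCircle_Coord (circle_centers : List (Int × Int)) : List (Int × List (Int × Int)) :=
  let circles_sorted1 := PySem.List.sorted circle_centers (fun x => x.1) false
  let x_values := circles_sorted1.map (fun center => center.1)
  let y_values := circles_sorted1.map (fun center => center.2)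
  -- the for-loop: state (current_line, k, l)
  let st := (PySem.List.pyRange 0 ((x_values.length : Int) - 1) 1).foldl
    (fun (st : PySem.Dict Int (List (Int × Int)) × Int × List (Int × Int)) i =>
      let diff := PySem.List.pyGetD x_values (i + 1) 0 - PySem.List.pyGetD x_values i 0
      let l := st.2.2 ++ [(PySem.List.pyGetD x_values i 0, PySem.List.pyGetD y_values i 0)]
      if 5 < |diff| then
        if l.length < 10 then (st.1, st.2.1, ([] : List (Int × Int)))
        else (st.1.insert st.2.1 l, st.2.1 + 1, ([] : List (Int × Int)))
      else (st.1, st.2.1, l))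
    (PySem.Dict.empty, 0, [])
  let l := st.2.2 ++ [(PySem.List.pyGetD x_values ((x_values.length : Int) - 1) 0,
                       PySem.List.pyGetD y_values ((x_values.length : Int) - 1) 0)]
  let current_line := st.1.insert st.2.1 l
  let current_line_sorted := current_line.items.foldl
    (fun (d : PySem.Dict Int (List (Int × Int))) kl =>
      d.insert kl.1 (PySem.List.sorted kl.2 (fun x => x.2) false))
    PySem.Dict.empty
  current_line_sorted.items

-- ===== PORT B =====
-- literal transliteration of Source B; segs[-1] is pyGetD with default (segs is never empty).
def SortCircle_Coord_alt (circle_centers : List (Int × Int)) : List (Int × List (Int × Int)) :=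
  let pts := PySem.List.sorted circle_centers (fun p => p.1) false
  let n : Int := pts.length
  let breaks := ((PySem.List.pyRange 0 (n - 1) 1).filter
      (fun j => decide (5 < |(PySem.List.pyGetD pts (j + 1) (0, 0)).1
                            - (PySem.List.pyGetD pts j (0, 0)).1|))).map (fun j => j + 1)
  let bounds := 0 :: (breaks ++ [n])
  let segs := (bounds.zip (PySem.List.slice bounds (some 1) none)).map
      (fun ab => PySem.List.slice pts (some ab.1) (some ab.2))
  let kept := (PySem.List.slice segs none (some (-1))).filter (fun s => decide (10 ≤ s.length))
              ++ [PySem.List.pyGetD segs (-1) []]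
  let d := (PySem.List.enumerate kept 0).foldl
    (fun (d : PySem.Dict Int (List (Int × Int))) p =>
      d.insert p.1 (PySem.List.sorted p.2 (fun q => q.2) false)) PySem.Dict.empty
  d.items

-- ===== PRECONDITION & SPEC =====
-- Pre_ excludes exactly the empty list: there A raises IndexError (x_values[len-1] on []).
def Pre_SortCircle_Coord (circle_centers : List (Int × Int)) : Prop := circle_centers ≠ []
instance (circle_centers : List (Int × Int)) : Decidable (Pre_SortCircle_Coord circle_centers) := by unfold Pre_SortCircle_Coord; infer_instance
def pvWitness_SortCircle_Coord : (List (Int × Int)) := [(0, 0)]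

def Spec_SortCircle_Coord (circle_centers : List (Int × Int)) (out : List (Int × List (Int × Int))) : Prop := out = SortCircle_Coord_alt circle_centers
instance (circle_centers : List (Int × Int)) (out : List (Int × List (Int × Int))) : Decidable (Spec_SortCircle_Coord circle_centers out) := by unfold Spec_SortCircle_Coord; infer_instance

-- ===== CLAIM (what is proved, stated in full; the proofs are below) =====
def Claim_equal_SortCircle_Coord : Prop := ∀ (circle_centers : List (Int × Int)), Dom_SortCircle_Coord circle_centers → Pre_SortCircle_Coord circle_centers → Spec_SortCircle_Coord circle_centers (SortCircle_Coord circle_centers)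
-- ===== LEMMAS AND PROOFS =====


def pvBrk (cs : List (Int × Int)) : List Nat :=
  (List.range (cs.length - 1)).filter
    (fun j => decide (5 < |(cs.getD (j + 1) (0, 0)).1 - (cs.getD j (0, 0)).1|))

def pvSegsN (pts : List (Int × Int)) (bs : List Nat) : List (List (Int × Int)) :=
  ((0 :: (bs ++ [pts.length])).zip (bs ++ [pts.length])).map
    (fun ab => (pts.drop ab.1).take (ab.2 - ab.1))

def pvConsH (l : List (Int × Int)) : List (List (Int × Int)) → List (List (Int × Int))
  | [] => [l]
  | s :: ss => (l ++ s) :: ss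

theorem pvBrk_cons (p q : Int × Int) (t : List (Int × Int)) :
    pvBrk (p :: q :: t)
      = (if 5 < |q.1 - p.1| then 0 :: (pvBrk (q :: t)).map Nat.succ
         else (pvBrk (q :: t)).map Nat.succ) := by
  unfold pvBrk
  have h1 : (p :: q :: t).length - 1 = (q :: t).length - 1 + 1 := by simp
  rw [h1, List.range_succ_eq_map, List.filter_cons, List.filter_map]
  simp only [List.getD_cons_succ, List.getD_cons_zero, Function.comp_def]
  split_ifs with h <;> simp_all

theorem pvZipSegs (p : Int × Int) (rest : List (Int × Int)) (x0 : Nat) (X : List Nat) :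
    (((x0 + 1) :: X.map (· + 1)).zip (X.map (· + 1))).map
        (fun ab => ((p :: rest).drop ab.1).take (ab.2 - ab.1))
      = ((x0 :: X).zip X).map (fun ab => (rest.drop ab.1).take (ab.2 - ab.1)) := by
  rw [show ((x0 + 1) :: X.map (· + 1)) = (x0 :: X).map (· + 1) from rfl, List.zip_map,
    List.map_map]
  refine List.map_congr_left ?_
  intro ab _
  simp [Nat.add_sub_add_right]

theorem pvSegs_shift (p : Int × Int) (rest : List (Int × Int)) (bs : List Nat) :
    pvSegsN (p :: rest) (bs.map Nat.succ) = pvConsH [p] (pvSegsN rest bs) := by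
  cases bs with
  | nil =>
    simp [pvSegsN, pvConsH, List.take_of_length_le]
  | cons b bs' =>
    unfold pvSegsN pvConsH
    simp only [Nat.succ_eq_add_one, List.map_cons, List.length_cons, List.cons_append,
      List.zip_cons_cons, List.map_cons]
    have hX : bs'.map (· + 1) ++ [rest.length + 1] = (bs' ++ [rest.length]).map (· + 1) := by
      simp
    rw [show (fun x => x + 1) = (· + 1) from rfl] at *
    rw [hX, pvZipSegs p rest b (bs' ++ [rest.length])]
    simp

theorem pvSegs_zero (p : Int × Int) (rest : List (Int × Int)) (bs : List Nat) :
    pvSegsN (p :: rest) ((0 :: bs).map Nat.succ) = [p] :: pvSegsN rest bs := by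
  unfold pvSegsN
  simp only [Nat.succ_eq_add_one, List.map_cons, List.length_cons, List.cons_append,
    List.zip_cons_cons, List.map_cons]
  have hX : bs.map (· + 1) ++ [rest.length + 1] = (bs ++ [rest.length]).map (· + 1) := by
    simp
  rw [show (fun x => x + 1) = (· + 1) from rfl] at *
  rw [hX, show (0 + 1 : Nat) = 0 + 1 from rfl, pvZipSegs p rest 0 (bs ++ [rest.length])]
  simp


def pvChunks : List (Int × Int) → List (List (Int × Int))
  | [] => [[]]
  | [p] => [[p]]
  | p :: q :: t =>
    if 5 < |q.1 - p.1| then [p] :: pvChunks (q :: t)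
    else
      match pvChunks (q :: t) with
      | s :: ss => (p :: s) :: ss
      | [] => [[p]]

theorem pvChunks_ne_nil (cs : List (Int × Int)) : pvChunks cs ≠ [] := by
  match cs with
  | [] => simp [pvChunks]
  | [p] => simp [pvChunks]
  | p :: q :: t =>
    unfold pvChunks
    split
    · simp
    · cases h : pvChunks (q :: t) <;> simp

def pvKept (css : List (List (Int × Int))) : List (List (Int × Int)) :=
  css.dropLast.filter (fun s => decide (10 ≤ s.length)) ++ [css.getLastD []]

def pvBody (st : PySem.Dict Int (List (Int × Int)) × Int × List (Int × Int))
    (pq : (Int × Int) × (Int × Int)) :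
    PySem.Dict Int (List (Int × Int)) × Int × List (Int × Int) :=
  let l := st.2.2 ++ [pq.1]
  if 5 < |pq.2.1 - pq.1.1| then
    if l.length < 10 then (st.1, st.2.1, ([] : List (Int × Int)))
    else (st.1.insert st.2.1 l, st.2.1 + 1, ([] : List (Int × Int)))
  else (st.1, st.2.1, l)

theorem pvGetLastD_cons {α : Type} (p : α) (rest : List α) (d : α) (h : rest ≠ []) :
    (p :: rest).getLastD d = rest.getLastD d := by
  cases rest with
  | nil => exact absurd rfl h
  | cons a l => simp [List.getLastD_eq_getLast?, List.getLast?_cons_cons]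

theorem pvNotContains (dd : PySem.Dict Int (List (Int × Int))) (k : Int)
    (hk : ∀ k' ∈ dd.keys, k' < k) : dd.contains k = false := by
  cases hcon : dd.contains k with
  | false => rfl
  | true =>
    exact absurd (hk k ((PySem.Dict.contains_iff_mem_keys dd k).mp hcon)) (lt_irrefl k)

theorem pvKept_cons (x s : List (Int × Int)) (ss : List (List (Int × Int))) :
    pvKept (x :: s :: ss)
      = (if 10 ≤ x.length then [x] else []) ++ pvKept (s :: ss) := by
  simp only [pvKept]
  rw [List.dropLast_cons_of_ne_nil (by simp : (s :: ss) ≠ []), List.filter_cons,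
    pvGetLastD_cons x (s :: ss) [] (by simp)]
  by_cases h : 10 ≤ x.length
  · simp [h]
  · simp [h]

theorem pvMainA : ∀ (cs : List (Int × Int)), cs ≠ [] →
    ∀ (dd : PySem.Dict Int (List (Int × Int))) (k : Int) (l : List (Int × Int)),
    (∀ k' ∈ dd.keys, k' < k) →
    ((((cs.zip cs.tail).foldl pvBody (dd, k, l)).1.insert
        ((cs.zip cs.tail).foldl pvBody (dd, k, l)).2.1
        (((cs.zip cs.tail).foldl pvBody (dd, k, l)).2.2 ++ [cs.getLastD (0, 0)])).items)
      = dd.items ++ PySem.List.enumerate (pvKept (pvConsH l (pvChunks cs))) k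
  | [], h => absurd rfl h
  | [p], _ => by
    intro dd k l hk
    simp only [List.tail_cons, List.zip_nil_right, List.foldl_nil]
    rw [PySem.Dict.items_insert_of_not_contains _ _ (pvNotContains dd k hk)]
    simp [pvChunks, pvConsH, pvKept, PySem.List.enumerate_cons, PySem.List.enumerate_nil]
  | p :: q :: t, _ => by
    intro dd k l hk
    have hC := pvChunks_ne_nil (q :: t)
    simp only [List.tail_cons, List.zip_cons_cons, List.foldl_cons]
    have hlast : (p :: q :: t).getLastD (0, 0) = (q :: t).getLastD (0, 0) :=
      pvGetLastD_cons _ _ _ (by simp)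
    rw [hlast]
    by_cases hg : 5 < |q.1 - p.1|
    · by_cases hlen : (l ++ [p]).length < 10
      · have hb : pvBody (dd, k, l) (p, q) = (dd, k, ([] : List (Int × Int))) := by
          simp [pvBody, hg]
          simp at hlen
          omega
        have ih := pvMainA (q :: t) (by simp) dd k [] hk
        simp only [List.tail_cons] at ih
        rw [hb, ih]
        congr 2
        have hchunks : pvChunks (p :: q :: t) = [p] :: pvChunks (q :: t) := by
          conv_lhs => unfold pvChunks
          rw [if_pos hg]
        rw [hchunks]
        cases hCc : pvChunks (q :: t) with
        | nil => exact absurd hCc hC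
        | cons s ss =>
          simp only [pvConsH, List.nil_append]
          rw [pvKept_cons, if_neg (by simp at hlen ⊢; omega)]
          simp
      · have hb : pvBody (dd, k, l) (p, q) = (dd.insert k (l ++ [p]), k + 1, ([] : List (Int × Int))) := by
          simp [pvBody, hg]
          simp at hlen
          omega
        have hk' : ∀ k' ∈ (dd.insert k (l ++ [p])).keys, k' < k + 1 := by
          intro k' hmem
          rcases (PySem.Dict.mem_keys_insert _ _ _ _).mp hmem with h | h
          · omega
          · have := hk k' h; omega
        have ih := pvMainA (q :: t) (by simp) (dd.insert k (l ++ [p])) (k + 1) [] hk'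
        simp only [List.tail_cons] at ih
        rw [hb, ih]
        rw [PySem.Dict.items_insert_of_not_contains _ _ (pvNotContains dd k hk)]
        have hchunks : pvChunks (p :: q :: t) = [p] :: pvChunks (q :: t) := by
          conv_lhs => unfold pvChunks
          rw [if_pos hg]
        rw [hchunks]
        cases hCc : pvChunks (q :: t) with
        | nil => exact absurd hCc hC
        | cons s ss =>
          simp only [pvConsH, List.nil_append]
          rw [pvKept_cons, if_pos (by simp at hlen ⊢; omega)]
          simp [PySem.List.enumerate_cons]
    · have hb : pvBody (dd, k, l) (p, q) = (dd, k, l ++ [p]) := by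
        simp [pvBody, hg]
      have ih := pvMainA (q :: t) (by simp) dd k (l ++ [p]) hk
      simp only [List.tail_cons] at ih
      rw [hb, ih]
      congr 2
      have hchunks : ∀ s ss, pvChunks (q :: t) = s :: ss →
          pvChunks (p :: q :: t) = (p :: s) :: ss := by
        intro s ss hs
        conv_lhs => unfold pvChunks
        rw [if_neg hg, hs]
      cases hCc : pvChunks (q :: t) with
      | nil => exact absurd hCc hC
      | cons s ss =>
        rw [hchunks s ss hCc]
        simp [pvConsH]


theorem pvGetD_last {α : Type} (cs : List α) (d : α) :
    cs.getD (cs.length - 1) d = cs.getLastD d := by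
  rw [List.getLastD_eq_getLast?, List.getLast?_eq_getElem?, List.getD_eq_getElem?_getD]

theorem pvAdjFold {α σ : Type} (d : α) (f : σ → α → α → σ) :
    ∀ (cs : List α) (init : σ),
    (List.range (cs.length - 1)).foldl
        (fun acc j => f acc (cs.getD j d) (cs.getD (j + 1) d)) init
      = (cs.zip cs.tail).foldl (fun acc pq => f acc pq.1 pq.2) init
  | [], init => by simp
  | [p], init => by simp
  | p :: q :: t, init => by
    have : (p :: q :: t).length - 1 = (q :: t).length - 1 + 1 := by simp
    rw [this, List.range_succ_eq_map]
    simp only [List.foldl_cons, List.foldl_map, List.getD_cons_zero, List.getD_cons_succ]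
    have ih := pvAdjFold d f (q :: t) (f init p q)
    simp only [List.getD_cons_succ] at ih
    rw [ih]
    simp [List.zip_cons_cons]


theorem pvGetD_neg_one {α : Type} (xs : List α) (d : α) (h : xs ≠ []) :
    PySem.List.pyGetD xs (-1) d = xs.getLastD d := by
  cases xs with
  | nil => exact absurd rfl h
  | cons a l =>
    simp only [PySem.List.pyGetD, PySem.List.pyGet?, PySem.List.pyIdx?]
    norm_num
    rw [List.getLast?_eq_getElem?]
    simp

theorem pvConsH_nil (C : List (List (Int × Int))) (h : C ≠ []) : pvConsH [] C = C := by
  cases C with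
  | nil => exact absurd rfl h
  | cons s ss => simp [pvConsH]

theorem pvEnumFold (X : List (List (Int × Int))) :
    ((PySem.List.enumerate X 0).foldl
        (fun (d : PySem.Dict Int (List (Int × Int))) p =>
          d.insert p.1 (PySem.List.sorted p.2 (fun q => q.2) false)) PySem.Dict.empty).items
      = (PySem.List.enumerate X 0).map
          (fun a => (a.1, PySem.List.sorted a.2 (fun q => q.2) false)) := by
  have hnd : ((PySem.List.enumerate X 0).map (fun a => a.1)).Nodup := by
    have hp := PySem.List.pairwise_lt_enumerate X 0
    have h2 : (List.map (fun (a : Int × List (Int × Int)) => a.1)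
        (PySem.List.enumerate X 0)).Pairwise (· < ·) :=
      List.Pairwise.map _ (fun _ _ hlt => hlt) hp
    exact h2.imp ne_of_lt
  have := PySem.Dict.items_foldl_insert_fresh (PySem.List.enumerate X 0)
      (fun a => a.1) (fun a => PySem.List.sorted a.2 (fun q => q.2) false)
      PySem.Dict.empty (fun a _ => by simp [PySem.Dict.contains_empty]) hnd
  simpa using this

theorem pvA_core (ps : List (Int × Int)) (hne : ps ≠ []) :
    (let x_values := ps.map (fun center => center.1)
     let y_values := ps.map (fun center => center.2)
     let st := (PySem.List.pyRange 0 ((x_values.length : Int) - 1) 1).foldl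
       (fun (st : PySem.Dict Int (List (Int × Int)) × Int × List (Int × Int)) i =>
      let diff := PySem.List.pyGetD (ps.map (fun center => center.1)) (i + 1) 0 - PySem.List.pyGetD (ps.map (fun center => center.1)) i 0
      let l := st.2.2 ++ [(PySem.List.pyGetD (ps.map (fun center => center.1)) i 0, PySem.List.pyGetD (ps.map (fun center => center.2)) i 0)]
      if 5 < |diff| then
        if l.length < 10 then (st.1, st.2.1, ([] : List (Int × Int)))
        else (st.1.insert st.2.1 l, st.2.1 + 1, ([] : List (Int × Int)))
      else (st.1, st.2.1, l))
       (PySem.Dict.empty, 0, [])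
     (st.1.insert st.2.1
       (st.2.2 ++ [(PySem.List.pyGetD x_values ((x_values.length : Int) - 1) 0,
                    PySem.List.pyGetD y_values ((x_values.length : Int) - 1) 0)])).items)
      = PySem.List.enumerate (pvKept (pvChunks ps)) 0 := by
  have h0 : 0 < ps.length := List.length_pos_iff.mpr hne
  have hfst : ∀ j : Nat, (ps.map (fun center => center.1)).getD j 0 = (ps.getD j ((0 : Int), (0 : Int))).1 := by
    intro j
    simpa using List.getD_map ps ((0 : Int), (0 : Int)) (fun center => center.1)
  have hsnd : ∀ j : Nat, (ps.map (fun center => center.2)).getD j 0 = (ps.getD j ((0 : Int), (0 : Int))).2 := by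
    intro j
    simpa using List.getD_map ps ((0 : Int), (0 : Int)) (fun center => center.2)
  have hcast : (((ps.map (fun center => center.1)).length : Int) - 1) = ((ps.length - 1 : Nat) : Int) := by
    simp only [List.length_map]
    omega
  simp only [hcast, PySem.List.pyRange_zero_natCast, List.foldl_map,
    PySem.List.pyGetD_natCast, ← Nat.cast_add_one]
  simp only [hfst, hsnd, Prod.mk.eta]
  have hfold :
      List.foldl
        (fun (x : PySem.Dict Int (List (Int × Int)) × Int × List (Int × Int)) (y : Nat) =>
          if 5 < |(ps.getD (y + 1) (0, 0)).1 - (ps.getD y (0, 0)).1| then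
            if (x.2.2 ++ [ps.getD y (0, 0)]).length < 10 then (x.1, x.2.1, [])
            else (x.1.insert x.2.1 (x.2.2 ++ [ps.getD y (0, 0)]), x.2.1 + 1, [])
          else (x.1, x.2.1, x.2.2 ++ [ps.getD y (0, 0)]))
        (PySem.Dict.empty, 0, []) (List.range (ps.length - 1))
      = (ps.zip ps.tail).foldl pvBody (PySem.Dict.empty, 0, []) :=
    pvAdjFold ((0, 0) : Int × Int) (fun acc a b => pvBody acc (a, b)) ps (PySem.Dict.empty, 0, [])
  rw [hfold, pvGetD_last]
  have hmain := pvMainA ps hne PySem.Dict.empty 0 [] (by simp)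
  rw [pvConsH_nil _ (pvChunks_ne_nil ps)] at hmain
  simpa using hmain

theorem pvA_eq (cc : List (Int × Int)) (h : cc ≠ []) :
    SortCircle_Coord cc
      = (PySem.List.enumerate
            (pvKept (pvChunks (PySem.List.sorted cc (fun x => x.1) false))) 0).map
          (fun a => (a.1, PySem.List.sorted a.2 (fun q => q.2) false)) := by
  have hpts : PySem.List.sorted cc (fun p => p.1) false ≠ [] := by
    simp [PySem.List.sorted_eq_nil_iff, h]
  simp only [SortCircle_Coord]
  rw [pvA_core _ hpts]
  exact pvEnumFold _

theorem pvSegs_eq_chunks : ∀ pts : List (Int × Int),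
    pvSegsN pts ((pvBrk pts).map Nat.succ) = pvChunks pts
  | [] => by simp [pvSegsN, pvBrk, pvChunks]
  | [p] => by simp [pvSegsN, pvBrk, pvChunks]
  | p :: q :: t => by
    rw [pvBrk_cons]
    by_cases h : 5 < |q.1 - p.1|
    · rw [if_pos h]
      rw [show ((0 :: (pvBrk (q :: t)).map Nat.succ).map Nat.succ)
            = ((0 :: (pvBrk (q :: t)).map Nat.succ).map Nat.succ) from rfl]
      rw [pvSegs_zero, pvSegs_eq_chunks (q :: t)]
      conv_rhs => unfold pvChunks
      rw [if_pos h]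
    · rw [if_neg h, pvSegs_shift, pvSegs_eq_chunks (q :: t)]
      conv_rhs => unfold pvChunks
      rw [if_neg h]
      cases hC : pvChunks (q :: t) with
      | nil => exact absurd hC (pvChunks_ne_nil _)
      | cons s ss => simp [pvConsH]

theorem pvBreaks_cast (pts : List (Int × Int)) (h : pts ≠ []) :
    ((PySem.List.pyRange 0 ((pts.length : Int) - 1) 1).filter
        (fun j => decide (5 < |(PySem.List.pyGetD pts (j + 1) (0, 0)).1
                              - (PySem.List.pyGetD pts j (0, 0)).1|))).map (fun j => j + 1)
      = List.map (fun k : Nat => (k : Int)) ((pvBrk pts).map Nat.succ) := by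
  have h0 : 0 < pts.length := List.length_pos_iff.mpr h
  have hlen : (pts.length : Int) - 1 = ((pts.length - 1 : Nat) : Int) := by omega
  rw [hlen, PySem.List.pyRange_zero_natCast, List.filter_map]
  have hfil : List.filter ((fun j : Int => decide (5 < |(PySem.List.pyGetD pts (j + 1) (0, 0)).1
                  - (PySem.List.pyGetD pts j (0, 0)).1|)) ∘ (fun k : Nat => (k : Int)))
        (List.range (pts.length - 1)) = pvBrk pts := by
    unfold pvBrk
    congr 1
    funext j
    simp only [Function.comp_apply, ← Nat.cast_add_one, PySem.List.pyGetD_natCast]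
  rw [hfil]
  simp only [List.map_map]
  refine List.map_congr_left ?_
  intro j _
  simp

theorem pvSegs_cast (pts : List (Int × Int)) (bs : List Nat) :
    ((0 :: (List.map (fun k : Nat => (k : Int)) bs ++ [(pts.length : Int)])).zip
        (PySem.List.slice (0 :: (List.map (fun k : Nat => (k : Int)) bs ++ [(pts.length : Int)]))
          (some 1) none)).map
        (fun ab => PySem.List.slice pts (some ab.1) (some ab.2))
      = pvSegsN pts bs := by
  rw [PySem.List.slice_from_one]
  have hm : (0 : Int) :: (List.map (fun k : Nat => (k : Int)) bs ++ [(pts.length : Int)])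
      = (0 :: (bs ++ [pts.length])).map (fun k : Nat => (k : Int)) := by simp
  rw [hm, show ((0 :: (bs ++ [pts.length])).map (fun k : Nat => (k : Int))).tail
        = (bs ++ [pts.length]).map (fun k : Nat => (k : Int)) from by simp,
    show (bs ++ [pts.length]).map (fun k : Nat => (k : Int))
        = ((bs ++ [pts.length]).map (fun k : Nat => (k : Int))) from rfl,
    List.zip_map, List.map_map]
  refine List.map_congr_left ?_
  intro ab _
  simp [PySem.List.slice_natCast]

theorem pvB_eq (cc : List (Int × Int)) (h : cc ≠ []) :
    SortCircle_Coord_alt cc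
      = (PySem.List.enumerate
            (pvKept (pvChunks (PySem.List.sorted cc (fun x => x.1) false))) 0).map
          (fun a => (a.1, PySem.List.sorted a.2 (fun q => q.2) false)) := by
  have hpts : PySem.List.sorted cc (fun p => p.1) false ≠ [] := by
    simp [PySem.List.sorted_eq_nil_iff, h]
  simp only [SortCircle_Coord_alt]
  rw [pvBreaks_cast _ hpts, pvSegs_cast, pvSegs_eq_chunks, PySem.List.slice_to_neg_one,
    pvGetD_neg_one _ _ (pvChunks_ne_nil _)]
  exact pvEnumFold _

-- ===== VERDICT (by name: the statement is the Claim_ definition above) =====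
theorem SortCircle_Coord_spec : Claim_equal_SortCircle_Coord := by
  intro cc _ hpre
  unfold Spec_SortCircle_Coord
  rw [pvA_eq cc hpre, pvB_eq cc hpre]
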